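-- pv_equiv track=rewrite | github.com/BackEunHo/Programmers | 프로그래머스/0/181887. 홀수 vs 짝수/홀수 vs 짝수.py | solution
-- ===== SOURCE A (Python) =====
-- def solution(num_list):
--     even = 0
--     odd = 0
--     for idx,value in enumerate(num_list):
--         idx += 1
--         if idx % 2 == 0:
--             odd += value
--         else:
--             even += value
--     return max(even,odd)
-- ===== SOURCE B (Python) =====
-- def solution(num_list):
--     total = sum(num_list)
--     diff = 0
--     sign = 1
--     for v in num_list:
--         diff += sign * v
--         sign = -sign
--     return (total + abs(diff)) // 2
-- ===== Notes on version B (the rewrite author's own statement) =====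
-- stated objective: alternative
-- what changed: Replaces the parity-branching loop with the algebraic identity max(e,o) = (total + |e-o|)//2: B computes the plain sum and an alternating-sign sum, never splits into two parity accumulators and never calls max.
import Mathlib
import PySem

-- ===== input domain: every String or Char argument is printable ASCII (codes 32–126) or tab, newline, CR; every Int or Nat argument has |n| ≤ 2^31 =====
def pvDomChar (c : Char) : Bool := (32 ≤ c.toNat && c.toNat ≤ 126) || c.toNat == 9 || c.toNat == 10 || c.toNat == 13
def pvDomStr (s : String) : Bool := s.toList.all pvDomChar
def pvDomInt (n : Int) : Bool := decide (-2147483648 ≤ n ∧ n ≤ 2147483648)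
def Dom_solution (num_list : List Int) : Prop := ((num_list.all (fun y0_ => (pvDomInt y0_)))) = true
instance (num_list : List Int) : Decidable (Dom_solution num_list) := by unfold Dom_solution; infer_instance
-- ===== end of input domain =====

-- B replaces the parity-branching loop with the algebraic identity
-- max(e,o) = (total + |e-o|) // 2, via a plain sum and an alternating-sign sum
-- (objective: alternative).

-- ===== PORT A =====
def solution (num_list : List Int) : Int :=
  let p := (PySem.List.enumerate num_list 0).foldl
    (fun (s : Int × Int) (iv : Int × Int) =>
      let idx := iv.1 + 1
      if idx % 2 == 0 then (s.1, s.2 + iv.2) else (s.1 + iv.2, s.2))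
    (0, 0)
  max p.1 p.2

-- ===== PORT B =====
-- Source B: total = sum(num_list); one loop accumulating diff with a flipping sign;
-- return (total + abs(diff)) // 2.
def solution_alt (num_list : List Int) : Int :=
  let total := num_list.foldl (· + ·) 0
  let p := num_list.foldl (fun (s : Int × Int) v => (s.1 + s.2 * v, -s.2)) (0, 1)
  PySem.Int.floordiv (total + |p.1|) 2

-- ===== PRECONDITION & SPEC =====
def Spec_solution (num_list : List Int) (out : Int) : Prop := out = solution_alt num_list
instance (num_list : List Int) (out : Int) : Decidable (Spec_solution num_list out) := by unfold Spec_solution; infer_instance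

-- ===== CLAIM (what is proved, stated in full; the proofs are below) =====
def Claim_equal_solution : Prop := ∀ (num_list : List Int), Dom_solution num_list → Spec_solution num_list (solution num_list)

-- ===== LEMMAS AND PROOFS =====

-- (even-index sum, odd-index sum) of a list
def eoSum : List Int → Int × Int
  | [] => (0, 0)
  | x :: xs => ((eoSum xs).2 + x, (eoSum xs).1)

lemma solution_fold_eo (xs : List Int) : ∀ (s : Nat) (e o : Int),
    ((PySem.List.enumerate xs (2 * (s : Int))).foldl
      (fun (st : Int × Int) (iv : Int × Int) =>
        if (iv.1 + 1) % 2 == 0 then (st.1, st.2 + iv.2) else (st.1 + iv.2, st.2))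
      (e, o) = (e + (eoSum xs).1, o + (eoSum xs).2))
    ∧
    ((PySem.List.enumerate xs (2 * (s : Int) + 1)).foldl
      (fun (st : Int × Int) (iv : Int × Int) =>
        if (iv.1 + 1) % 2 == 0 then (st.1, st.2 + iv.2) else (st.1 + iv.2, st.2))
      (e, o) = (e + (eoSum xs).2, o + (eoSum xs).1)) := by
  induction xs with
  | nil => intro s e o; simp [PySem.List.enumerate_nil, eoSum]
  | cons x xs ih =>
      intro s e o
      constructor
      · simp only [PySem.List.enumerate_cons, List.foldl]
        have h1 : (2 * (s : Int) + 1) % 2 = 1 := by omega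
        simp only [h1, show ((1 : Int) == 0) = false from rfl, Bool.false_eq_true, if_false]
        rw [(ih s (e + x) o).2]
        simp [eoSum, Prod.mk.injEq]; omega
      · simp only [PySem.List.enumerate_cons, List.foldl]
        have h2 : (2 * (s : Int) + 1 + 1) % 2 = 0 := by omega
        simp only [h2, show ((0 : Int) == 0) = true from rfl, if_true]
        have h3 : (2 * (s : Int) + 1 + 1) = 2 * ((s + 1 : Nat) : Int) := by push_cast; ring
        rw [h3, (ih (s + 1) e (o + x)).1]
        simp [eoSum, Prod.mk.injEq]; omega

lemma sum_fold_eo (xs : List Int) : ∀ (t : Int),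
    xs.foldl (· + ·) t = t + (eoSum xs).1 + (eoSum xs).2 := by
  induction xs with
  | nil => intro t; simp [eoSum]
  | cons x xs ih =>
      intro t
      simp only [List.foldl, ih (t + x), eoSum]
      ring

lemma diff_fold_eo (xs : List Int) : ∀ (d : Int),
    ((xs.foldl (fun (s : Int × Int) v => (s.1 + s.2 * v, -s.2)) (d, 1)).1
       = d + (eoSum xs).1 - (eoSum xs).2)
    ∧
    ((xs.foldl (fun (s : Int × Int) v => (s.1 + s.2 * v, -s.2)) (d, -1)).1
       = d - (eoSum xs).1 + (eoSum xs).2) := by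
  induction xs with
  | nil => intro d; simp [eoSum]
  | cons x xs ih =>
      intro d
      constructor
      · simp only [List.foldl]
        rw [(ih (d + 1 * x)).2]
        simp [eoSum]; ring
      · simp only [List.foldl, neg_neg]
        rw [(ih (d + -1 * x)).1]
        simp [eoSum]; ring

-- ===== VERDICT (by name: the statement is the Claim_ definition above) =====
theorem solution_spec : Claim_equal_solution := by
  intro xs _
  simp only [Spec_solution, solution, solution_alt]
  have hA := (solution_fold_eo xs 0 0 0).1
  simp only [Nat.cast_zero, mul_zero, zero_add] at hA
  rw [hA]
  have hT := sum_fold_eo xs 0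
  have hD := (diff_fold_eo xs 0).1
  rw [hT, hD]
  set e := (eoSum xs).1
  set o := (eoSum xs).2
  rw [PySem.Int.floordiv_eq_ediv_of_pos (by omega : (0:Int) < 2)]
  rcases abs_cases (0 + e - o) with ⟨h1, h2⟩ | ⟨h1, h2⟩
  · have : 0 + e + o + |0 + e - o| = 2 * e := by rw [h1]; ring
    rw [this, Int.mul_ediv_cancel_left _ (by norm_num)]
    omega
  · have : 0 + e + o + |0 + e - o| = 2 * o := by rw [h1]; ring
    rw [this, Int.mul_ediv_cancel_left _ (by norm_num)]
    omega
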